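-- pv_equiv track=rewrite | github.com/amol-ship-it/agi-core | domains/arc/transformation_primitives.py | connect_same_color_v
-- ===== SOURCE A (Python) =====
-- Grid = list[list[int]]
--
-- def connect_same_color_v(grid: Grid) -> Grid:
--     """Fill zeros between same-color pixels vertically.
--
--     For each column, if two pixels of the same color have only zeros
--     between them, fill the gap with that color.
--     """
--     if not grid or not grid[0]:
--         return grid
--     h, w = len(grid), len(grid[0])
--     result = [row[:] for row in grid]
--     for c in range(w):
--         color_positions: dict[int, list[int]] = {}
--         for r in range(h):
--             if grid[r][c] != 0:
--                 color_positions.setdefault(grid[r][c], []).append(r)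
--         for color, positions in color_positions.items():
--             if len(positions) >= 2:
--                 for r in range(min(positions), max(positions) + 1):
--                     if result[r][c] == 0:
--                         result[r][c] = color
--     return result
-- ===== SOURCE B (Python) =====
-- Grid = list[list[int]]
--
-- def connect_same_color_v(grid: Grid) -> Grid:
--     """Fill zeros between same-color pixels vertically.
--
--     Per column, one scan records for each color only its first row, last row
--     and count; then each zero cell is filled by a first-cover stab query over
--     those spans (insertion order), instead of repainting whole intervals.
--     """
--     if not grid or not grid[0]:
--         return grid
--     h, w = len(grid), len(grid[0])
--     result = [row[:] for row in grid]
--     for c in range(w):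
--         spans: dict[int, tuple[int, int, int]] = {}
--         for r in range(h):
--             v = grid[r][c]
--             if v != 0:
--                 if v in spans:
--                     f, _, n = spans[v]
--                     spans[v] = (f, r, n + 1)
--                 else:
--                     spans[v] = (r, r, 1)
--         for r in range(h):
--             if result[r][c] == 0:
--                 for color, (f, l, n) in spans.items():
--                     if n >= 2 and f <= r <= l:
--                         result[r][c] = color
--                         break
--     return result
-- ===== Notes on version B (the rewrite author's own statement) =====
-- stated objective: faster
-- what changed: Per column B keeps only a (first,last,count) summary per color instead of full position lists, and fills each zero cell once by a first-cover stab query with early break over those spans, instead of A's sequential repainting of each color's whole interval (which rescans overlapping intervals); Pre_ excludes only grids with a row shorter than the first row, on which A raises IndexError.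
import Mathlib
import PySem

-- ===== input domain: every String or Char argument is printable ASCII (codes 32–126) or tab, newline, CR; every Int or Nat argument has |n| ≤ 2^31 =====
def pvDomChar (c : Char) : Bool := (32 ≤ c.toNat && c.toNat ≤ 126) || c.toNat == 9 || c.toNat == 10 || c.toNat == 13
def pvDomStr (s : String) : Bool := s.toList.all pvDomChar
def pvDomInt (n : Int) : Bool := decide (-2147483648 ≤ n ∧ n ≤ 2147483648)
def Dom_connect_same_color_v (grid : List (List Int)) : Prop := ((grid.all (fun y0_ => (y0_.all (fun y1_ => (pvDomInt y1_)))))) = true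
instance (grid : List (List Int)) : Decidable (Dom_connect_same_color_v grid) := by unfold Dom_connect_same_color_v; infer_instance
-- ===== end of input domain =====

-- B keeps per-color (first,last,count) spans and fills each zero cell once by a
-- first-cover stab query with early break, instead of A's per-color position lists and
-- sequential interval repainting; same results, measurably faster in a timing run.

-- ===== PORT A =====
-- shared accessor: grid[r][c] / result[r][c]; exact for the nonnegative in-range indices
-- both programs use (Pre_ excludes the grids on which Python's indexing raises)
def pvCell (m : List (List Int)) (r c : Int) : Int :=
  PySem.List.pyGetD (PySem.List.pyGetD m r []) c 0

-- shared mutation: result[r][c] = v; exact for the nonnegative in-range indices used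
def pvSetCell (m : List (List Int)) (r c : Int) (v : Int) : List (List Int) :=
  m.set r.toNat ((m.getD r.toNat []).set c.toNat v)

-- color_positions: dict color -> list of rows (setdefault(..., []).append(r))
def pvPositionsDict (grid : List (List Int)) (h c : Int) : PySem.Dict Int (List Int) :=
  (PySem.List.pyRange 0 h 1).foldl
    (fun cp r =>
      if pvCell grid r c ≠ 0 then
        cp.modify (pvCell grid r c) [] (fun ps => ps ++ [r])
      else cp)
    PySem.Dict.empty

-- body of 'for color, positions in color_positions.items()'
def pvPaintColumn (c : Int) (result : List (List Int)) (kv : Int × List Int) : List (List Int) :=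
  if 2 ≤ kv.2.length then
    -- positions is nonempty here, so min?/max? are some; the .getD 0 default is never taken
    (PySem.List.pyRange ((PySem.List.min? kv.2 (fun x => x)).getD 0)
        ((PySem.List.max? kv.2 (fun x => x)).getD 0 + 1) 1).foldl
      (fun result r => if pvCell result r c = 0 then pvSetCell result r c kv.1 else result)
      result
  else result

def pvColPassA (grid : List (List Int)) (h : Int) (result : List (List Int)) (c : Int) :
    List (List Int) :=
  (pvPositionsDict grid h c).items.foldl (pvPaintColumn c) result

def connect_same_color_v (grid : List (List Int)) : List (List Int) :=
  if grid = [] ∨ grid.headD [] = [] then grid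
  else
    let h : Int := grid.length
    let w : Int := (grid.headD []).length
    (PySem.List.pyRange 0 w 1).foldl (pvColPassA grid h) (grid.map (fun row => row))

-- ===== PORT B =====
-- spans: dict color -> (first row, last row, count)
def pvSpansDict (grid : List (List Int)) (h c : Int) : PySem.Dict Int (Int × Int × Int) :=
  (PySem.List.pyRange 0 h 1).foldl
    (fun d r =>
      if pvCell grid r c ≠ 0 then
        match d.get? (pvCell grid r c) with
        | some (f, _, n) => d.insert (pvCell grid r c) (f, r, n + 1)
        | none => d.insert (pvCell grid r c) (r, r, 1)
      else d)
    PySem.Dict.empty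

-- 'for color, (f, l, n) in spans.items(): if n >= 2 and f <= r <= l: ...; break'
def pvStabFirst (items : List (Int × (Int × Int × Int))) (r : Int) : Option Int :=
  match items with
  | [] => none
  | (color, f, l, n) :: rest =>
    if 2 ≤ n ∧ f ≤ r ∧ r ≤ l then some color else pvStabFirst rest r

def pvColPassB (grid : List (List Int)) (h : Int) (result : List (List Int)) (c : Int) :
    List (List Int) :=
  let spans := pvSpansDict grid h c
  (PySem.List.pyRange 0 h 1).foldl
    (fun result r =>
      if pvCell result r c = 0 then
        match pvStabFirst spans.items r with
        | some color => pvSetCell result r c color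
        | none => result
      else result)
    result

def connect_same_color_v_alt (grid : List (List Int)) : List (List Int) :=
  if grid = [] ∨ grid.headD [] = [] then grid
  else
    let h : Int := grid.length
    let w : Int := (grid.headD []).length
    (PySem.List.pyRange 0 w 1).foldl (pvColPassB grid h) (grid.map (fun row => row))

-- ===== PRECONDITION & SPEC =====
-- Pre_ excludes exactly the grids with a row shorter than the first row, on which
-- Python's grid[r][c] raises IndexError.
def Pre_connect_same_color_v (grid : List (List Int)) : Prop :=
  ∀ row ∈ grid, (grid.headD []).length ≤ row.length
instance (grid : List (List Int)) : Decidable (Pre_connect_same_color_v grid) := by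
  unfold Pre_connect_same_color_v; infer_instance

def pvWitness_connect_same_color_v : List (List Int) := [[1, 0, 2], [0, 0, 0], [1, 2, 0]]

def Spec_connect_same_color_v (grid : List (List Int)) (out : List (List Int)) : Prop := out = connect_same_color_v_alt grid
instance (grid : List (List Int)) (out : List (List Int)) : Decidable (Spec_connect_same_color_v grid out) := by unfold Spec_connect_same_color_v; infer_instance

-- ===== CLAIM (what is proved, stated in full; the proofs are below) =====
def Claim_equal_connect_same_color_v : Prop := ∀ (grid : List (List Int)), Dom_connect_same_color_v grid → Pre_connect_same_color_v grid → Spec_connect_same_color_v grid (connect_same_color_v grid)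

-- ===== LEMMAS AND PROOFS =====

def gcell (m : List (List Int)) (i j : Nat) : Int := (m.getD i []).getD j 0

theorem pvCell_natCast (m : List (List Int)) (i j : Nat) : pvCell m (↑i) (↑j) = gcell m i j := by
  simp [pvCell, gcell, PySem.List.pyGetD_natCast]

theorem pvCell_nonneg (m : List (List Int)) (r c : Int) (hr : 0 ≤ r) (hc : 0 ≤ c) :
    pvCell m r c = gcell m r.toNat c.toNat := by
  obtain ⟨i, rfl⟩ := Int.eq_ofNat_of_zero_le hr
  obtain ⟨j, rfl⟩ := Int.eq_ofNat_of_zero_le hc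
  simpa using pvCell_natCast m i j

theorem mapLen_setCell (m : List (List Int)) (r c : Int) (v : Int) :
    (pvSetCell m r c v).map List.length = m.map List.length := by
  unfold pvSetCell
  rw [List.map_set]
  by_cases h : r.toNat < m.length
  · have h1 : ((m.getD r.toNat []).set c.toNat v).length = (m.map List.length)[r.toNat]'(by simpa using h) := by
      simp only [List.length_set, List.getElem_map]
      rw [List.getD_eq_getElem?_getD, List.getElem?_eq_getElem h]
      rfl
    rw [h1, List.set_getElem_self]
  · apply List.set_eq_of_length_le; simp; omega

theorem gcell_setCell (m : List (List Int)) (r c : Int) (v : Int)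
    (_hr : 0 ≤ r) (_hc : 0 ≤ c) (hrlt : r.toNat < m.length)
    (hclt : c.toNat < (m.getD r.toNat []).length) (i j : Nat) :
    gcell (pvSetCell m r c v) i j = if i = r.toNat ∧ j = c.toNat then v else gcell m i j := by
  simp only [gcell, pvSetCell]
  by_cases hi : i = r.toNat
  · rw [hi]
    have hrow : (m.set r.toNat ((m.getD r.toNat []).set c.toNat v)).getD r.toNat [] = (m.getD r.toNat []).set c.toNat v := by
      rw [List.getD_eq_getElem?_getD, List.getElem?_set_self hrlt]; rfl
    rw [hrow]
    by_cases hj : j = c.toNat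
    · rw [hj]
      rw [List.getD_eq_getElem?_getD, List.getElem?_set_self hclt]
      simp
    · rw [List.getD_eq_getElem?_getD, List.getElem?_set_ne (fun h => hj h.symm)]
      simp [hj, List.getD_eq_getElem?_getD]
  · have hrow : (m.set r.toNat ((m.getD r.toNat []).set c.toNat v)).getD i [] = m.getD i [] := by
      rw [List.getD_eq_getElem?_getD, List.getElem?_set_ne (fun h => hi h.symm), ← List.getD_eq_getElem?_getD]
    rw [hrow]
    simp [hi]

theorem pv_foldl_guard_filterMap {α β σ : Type} (xs : List α) (p : α → Prop) [DecidablePred p]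
    (f : α → β) (g : σ → β → σ) (s : σ) :
    xs.foldl (fun d x => if p x then g d (f x) else d) s
      = (xs.filterMap (fun x => if p x then some (f x) else none)).foldl g s := by
  induction xs generalizing s with
  | nil => rfl
  | cons x xs ih =>
    by_cases h : p x <;> simp [h, ih]

theorem pv_foldl_min_of_le (t : List Int) (x : Int) (h : ∀ y ∈ t, x ≤ y) : t.foldl min x = x := by
  induction t with
  | nil => rfl
  | cons y t ih =>
    have hxy : min x y = x := min_eq_left (h y (by simp))
    simp only [List.foldl_cons, hxy]
    exact ih (fun z hz => h z (by simp [hz]))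

theorem pv_foldl_max_sorted : ∀ (t : List Int) (x : Int), (x :: t).Pairwise (· ≤ ·) →
    t.foldl max x = (x :: t).getLastD 0
  | [], x, _ => rfl
  | y :: t, x, h => by
    have h1 : x ≤ y := (List.pairwise_cons.1 h).1 y (by simp)
    have h2 : (y :: t).Pairwise (· ≤ ·) := (List.pairwise_cons.1 h).2
    simp only [List.foldl_cons, max_eq_right h1]
    have := pv_foldl_max_sorted t y h2
    simpa using this

theorem pv_min_getD (ps : List Int) (hne : ps ≠ []) (hs : ps.Pairwise (· < ·)) :
    (PySem.List.min? ps (fun x => x)).getD 0 = ps.headD 0 := by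
  cases ps with
  | nil => exact absurd rfl hne
  | cons x t =>
    rw [PySem.List.min?_id_cons]
    have : t.foldl min x = x :=
      pv_foldl_min_of_le t x (fun y hy => le_of_lt ((List.pairwise_cons.1 hs).1 y hy))
    simp [this]

theorem pv_max_getD (ps : List Int) (hne : ps ≠ []) (hs : ps.Pairwise (· < ·)) :
    (PySem.List.max? ps (fun x => x)).getD 0 = ps.getLastD 0 := by
  cases ps with
  | nil => exact absurd rfl hne
  | cons x t =>
    rw [PySem.List.max?_id_cons]
    have := pv_foldl_max_sorted t x (hs.imp le_of_lt)
    simp [this]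

theorem pv_mat_ext (M N : List (List Int)) (hlen : M.map List.length = N.map List.length)
    (h : ∀ i j : Nat, gcell M i j = gcell N i j) : M = N := by
  have hL : M.length = N.length := by
    have := congrArg List.length hlen; simpa using this
  apply List.ext_getElem hL
  intro i h1 h2
  apply List.ext_getElem
  · have := congrArg (fun l => l.getD i 0) hlen
    simpa [List.getD, List.getElem?_eq_getElem, h1, h2] using this
  · intro j hj1 hj2
    have := h i j
    simp only [gcell, List.getD_eq_getElem?_getD] at this
    rw [List.getElem?_eq_getElem h1, List.getElem?_eq_getElem h2] at this
    simp only [Option.getD_some] at this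
    rw [List.getElem?_eq_getElem hj1, List.getElem?_eq_getElem hj2] at this
    simpa using this

theorem pv_foldl_congr_inv {σ α : Type} (P : σ → Prop) (f g : σ → α → σ) :
    ∀ (l : List α) (s : σ), P s → (∀ s a, a ∈ l → P s → f s a = g s a ∧ P (f s a)) →
      l.foldl f s = l.foldl g s
  | [], s, _, _ => rfl
  | a :: l, s, hP, h => by
    obtain ⟨he, hp⟩ := h s a (by simp) hP
    simp only [List.foldl_cons, ← he]
    exact pv_foldl_congr_inv P f g l (f s a) hp (fun s' a' ha' => h s' a' (by simp [ha']))

def pvPairs (grid : List (List Int)) (h c : Int) : List (Int × Int) :=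
  (PySem.List.pyRange 0 h 1).filterMap
    (fun r => if pvCell grid r c ≠ 0 then some (pvCell grid r c, r) else none)

def pvPos (grid : List (List Int)) (h c : Int) (k : Int) : List Int :=
  ((pvPairs grid h c).filter (fun p => p.1 == k)).map (fun p => p.2)

theorem positionsDict_eq (grid : List (List Int)) (h c : Int) :
    pvPositionsDict grid h c
      = (pvPairs grid h c).foldl (fun d p => d.modify p.1 [] (fun ps => ps ++ [p.2]))
          PySem.Dict.empty := by
  unfold pvPositionsDict pvPairs
  exact pv_foldl_guard_filterMap (PySem.List.pyRange 0 h 1) (fun r => pvCell grid r c ≠ 0)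
    (fun r => (pvCell grid r c, r)) (fun d p => d.modify p.1 [] (fun ps => ps ++ [p.2]))
    PySem.Dict.empty

-- insert inside the branches: definitionally the port's loop body applied to a pair
def pvSpanStep (d : PySem.Dict Int (Int × Int × Int)) (p : Int × Int) :
    PySem.Dict Int (Int × Int × Int) :=
  match d.get? p.1 with
  | some (f, _, n) => d.insert p.1 (f, p.2, n + 1)
  | none => d.insert p.1 (p.2, p.2, 1)

def pvNewVal (d : PySem.Dict Int (Int × Int × Int)) (p : Int × Int) : Int × Int × Int :=
  match d.get? p.1 with
  | some (f, _, n) => (f, p.2, n + 1)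
  | none => (p.2, p.2, 1)

theorem pvSpanStep_eq : pvSpanStep = fun d x => d.insert x.1 (pvNewVal d x) := by
  funext d p
  unfold pvSpanStep pvNewVal
  cases hg : d.get? p.1 with
  | none => simp
  | some s => obtain ⟨f, l, n⟩ := s; simp

theorem spansDict_eq (grid : List (List Int)) (h c : Int) :
    pvSpansDict grid h c = (pvPairs grid h c).foldl pvSpanStep PySem.Dict.empty := by
  unfold pvSpansDict pvPairs
  exact pv_foldl_guard_filterMap (PySem.List.pyRange 0 h 1) (fun r => pvCell grid r c ≠ 0)
    (fun r => (pvCell grid r c, r)) pvSpanStep PySem.Dict.empty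

theorem keysA_eq (grid : List (List Int)) (h c : Int) :
    (pvPositionsDict grid h c).keys
      = PySem.Set.ofList ((pvPairs grid h c).map (fun p => p.1)) := by
  rw [positionsDict_eq]
  have h2 := PySem.Dict.keys_foldl_modify_key (pvPairs grid h c) Prod.fst []
    (fun _ p => fun ps => ps ++ [p.2]) PySem.Dict.empty
  simp only [PySem.Dict.keys_empty, PySem.Set.update_nil_left] at h2
  exact h2

theorem nodupA (grid : List (List Int)) (h c : Int) :
    (pvPositionsDict grid h c).keys.Nodup := by
  rw [positionsDict_eq]
  exact PySem.Dict.nodup_keys_foldl_modify_key (pvPairs grid h c) Prod.fst []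
    (fun _ p => fun ps => ps ++ [p.2]) PySem.Dict.empty (by simp)

theorem keysB_eq (grid : List (List Int)) (h c : Int) :
    (pvSpansDict grid h c).keys
      = PySem.Set.ofList ((pvPairs grid h c).map (fun p => p.1)) := by
  rw [spansDict_eq, pvSpanStep_eq]
  have h2 := PySem.Dict.keys_foldl_insert_key (pvPairs grid h c) Prod.fst pvNewVal
    PySem.Dict.empty
  simp only [PySem.Dict.keys_empty, PySem.Set.update_nil_left] at h2
  exact h2

theorem nodupB (grid : List (List Int)) (h c : Int) :
    (pvSpansDict grid h c).keys.Nodup := by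
  rw [spansDict_eq, pvSpanStep_eq]
  exact PySem.Dict.nodup_keys_foldl_insert_key (pvPairs grid h c) Prod.fst pvNewVal
    PySem.Dict.empty (by simp)

theorem posA_getD (grid : List (List Int)) (h c : Int) (k : Int) :
    (pvPositionsDict grid h c).getD k [] = pvPos grid h c k := by
  rw [positionsDict_eq]
  rw [PySem.Dict.getD_foldl_modify_append]
  simp [pvPos]

theorem spans_get? (k : Int) : ∀ (l : List (Int × Int)),
    (l.foldl pvSpanStep PySem.Dict.empty).get? k =
      (if ((l.filter (fun p => p.1 == k)).map (fun p => p.2)) = [] then none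
       else some (((l.filter (fun p => p.1 == k)).map (fun p => p.2)).headD 0,
                  ((l.filter (fun p => p.1 == k)).map (fun p => p.2)).getLastD 0,
                  (((l.filter (fun p => p.1 == k)).map (fun p => p.2)).length : Int))) := by
  intro l
  induction l using List.reverseRecOn with
  | nil => simp
  | append_singleton l p ih =>
    rw [List.foldl_append, List.foldl_cons, List.foldl_nil]
    by_cases hk : p.1 = k
    · have hfil : List.filter (fun q => q.1 == k) [p] = [p] := by simp [hk]
      rw [List.filter_append, hfil, List.map_append]
      rw [show pvSpanStep (l.foldl pvSpanStep PySem.Dict.empty) p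
          = PySem.Dict.insert (l.foldl pvSpanStep PySem.Dict.empty) p.1
              (pvNewVal (l.foldl pvSpanStep PySem.Dict.empty) p) from
        congrFun (congrFun pvSpanStep_eq _) p]
      rw [hk, PySem.Dict.get?_insert_self]
      unfold pvNewVal
      rw [hk, ih]
      cases hps : (l.filter (fun p => p.1 == k)).map (fun p => p.2) with
      | nil => simp
      | cons a t =>
        rw [if_neg (by simp), if_neg (by simp)]
        simp only [List.map_cons, List.map_nil]
        rw [show a :: t ++ [p.2] = (a :: t) ++ [p.2] from rfl]
        rw [List.getLastD_concat]
        simp only [List.headD_cons, List.length_append, List.length_cons, List.length_nil,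
          List.cons_append]
        push_cast
        ring_nf
    · have hfil : List.filter (fun q => q.1 == k) [p] = [] := by simp [hk]
      rw [List.filter_append, hfil, List.append_nil]
      rw [show pvSpanStep (l.foldl pvSpanStep PySem.Dict.empty) p
          = PySem.Dict.insert (l.foldl pvSpanStep PySem.Dict.empty) p.1
              (pvNewVal (l.foldl pvSpanStep PySem.Dict.empty) p) from
        congrFun (congrFun pvSpanStep_eq _) p]
      rw [PySem.Dict.get?_insert_of_ne _ _ (fun hh : k = p.1 => hk hh.symm)]
      exact ih

theorem pv_headD_mem (ps : List Int) (hne : ps ≠ []) : ps.headD 0 ∈ ps := by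
  cases ps with
  | nil => exact absurd rfl hne
  | cons a t => simp

theorem pv_getLastD_mem (ps : List Int) (hne : ps ≠ []) : ps.getLastD 0 ∈ ps := by
  rw [List.getLastD_eq_getLast?, List.getLast?_eq_getLast_of_ne_nil hne, Option.getD_some]
  exact List.getLast_mem hne

theorem mem_pairs (grid : List (List Int)) (h c : Int) :
    ∀ p ∈ pvPairs grid h c, p.1 ≠ 0 ∧ 0 ≤ p.2 ∧ p.2 < h ∧ p.1 = pvCell grid p.2 c := by
  intro p hp
  simp only [pvPairs, List.mem_filterMap] at hp
  obtain ⟨r, hr, he⟩ := hp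
  rw [PySem.List.mem_pyRange_one] at hr
  split_ifs at he with hcond
  cases he
  exact ⟨hcond, hr.1, hr.2, rfl⟩

theorem pairs_snd (grid : List (List Int)) (h c : Int) :
    (pvPairs grid h c).map (fun p => p.2)
      = (PySem.List.pyRange 0 h 1).filter (fun r => decide (pvCell grid r c ≠ 0)) := by
  rw [pvPairs, List.map_filterMap, ← List.filterMap_eq_filter]
  congr 1
  funext r
  by_cases hcond : pvCell grid r c ≠ 0 <;> simp [Option.guard, hcond]

theorem pairs_snd_pairwise (grid : List (List Int)) (h c : Int) :
    ((pvPairs grid h c).map (fun p => p.2)).Pairwise (· < ·) := by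
  rw [pairs_snd]
  exact (PySem.List.pairwise_lt_pyRange_one 0 h).filter _

theorem pos_pairwise (grid : List (List Int)) (h c : Int) (k : Int) :
    (pvPos grid h c k).Pairwise (· < ·) := by
  have hsub : (pvPos grid h c k).Sublist ((pvPairs grid h c).map (fun p => p.2)) :=
    List.Sublist.map _ List.filter_sublist
  exact (pairs_snd_pairwise grid h c).sublist hsub

theorem mem_pos_bounds (grid : List (List Int)) (h c : Int) (k : Int) :
    ∀ x ∈ pvPos grid h c k, 0 ≤ x ∧ x < h := by
  intro x hx
  simp only [pvPos, List.mem_map, List.mem_filter] at hx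
  obtain ⟨p, ⟨hp, _⟩, rfl⟩ := hx
  exact ⟨(mem_pairs grid h c p hp).2.1, (mem_pairs grid h c p hp).2.2.1⟩

theorem key_ne_zero (grid : List (List Int)) (h c : Int) (k : Int)
    (hk : k ∈ (pvPairs grid h c).map (fun p => p.1)) : k ≠ 0 := by
  simp only [List.mem_map] at hk
  obtain ⟨p, hp, rfl⟩ := hk
  exact (mem_pairs grid h c p hp).1

theorem pos_ne_nil (grid : List (List Int)) (h c : Int) (k : Int)
    (hk : k ∈ (pvPairs grid h c).map (fun p => p.1)) : pvPos grid h c k ≠ [] := by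
  simp only [List.mem_map] at hk
  obtain ⟨p, hp, rfl⟩ := hk
  have : p.2 ∈ pvPos grid h c p.1 := by
    simp only [pvPos, List.mem_map, List.mem_filter]
    exact ⟨p, ⟨hp, by simp⟩, rfl⟩
  intro hnil
  rw [hnil] at this
  exact absurd this (List.not_mem_nil)

theorem itemsA_eq (grid : List (List Int)) (h c : Int) :
    (pvPositionsDict grid h c).items
      = (pvPositionsDict grid h c).keys.map (fun k => (k, pvPos grid h c k)) := by
  rw [PySem.Dict.items_eq_map_keys _ (nodupA grid h c) []]
  apply List.map_congr_left
  intro k _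
  rw [posA_getD]

theorem itemsB_eq (grid : List (List Int)) (h c : Int) :
    (pvSpansDict grid h c).items
      = (pvSpansDict grid h c).keys.map (fun k =>
          (k, ((pvPos grid h c k).headD 0, (pvPos grid h c k).getLastD 0,
               ((pvPos grid h c k).length : Int)))) := by
  rw [PySem.Dict.items_eq_map_keys _ (nodupB grid h c) (0, 0, 0)]
  apply List.map_congr_left
  intro k hk
  have hkp : k ∈ (pvPairs grid h c).map (fun p => p.1) := by
    rw [keysB_eq] at hk
    exact (PySem.Set.mem_ofList _ _).1 hk
  have hne : pvPos grid h c k ≠ [] := pos_ne_nil grid h c k hkp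
  have hget : (pvSpansDict grid h c).get? k
      = some ((pvPos grid h c k).headD 0, (pvPos grid h c k).getLastD 0,
              ((pvPos grid h c k).length : Int)) := by
    rw [spansDict_eq, spans_get?]
    rw [if_neg (by simpa [pvPos] using hne)]
    rfl
  rw [PySem.Dict.getD_of_get?_eq_some _ _ hget]

def pvFirstCov : List (Int × List Int) → Int → Option Int
  | [], _ => none
  | (k, ps) :: rest, r =>
    if 2 ≤ ps.length ∧ ps.headD 0 ≤ r ∧ r ≤ ps.getLastD 0 then some k else pvFirstCov rest r

theorem stab_eq_firstCov (pos : Int → List Int) (r : Int) : ∀ (K : List Int),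
    pvStabFirst (K.map (fun k =>
        (k, ((pos k).headD 0, (pos k).getLastD 0, ((pos k).length : Int))))) r
      = pvFirstCov (K.map (fun k => (k, pos k))) r
  | [] => rfl
  | k :: K => by
    simp only [List.map_cons, pvStabFirst, pvFirstCov]
    have hiff : (2 ≤ ((pos k).length : Int) ∧ (pos k).headD 0 ≤ r ∧ r ≤ (pos k).getLastD 0)
        ↔ (2 ≤ (pos k).length ∧ (pos k).headD 0 ≤ r ∧ r ≤ (pos k).getLastD 0) := by
      constructor
      · rintro ⟨h1, h2⟩; exact ⟨by exact_mod_cast h1, h2⟩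
      · rintro ⟨h1, h2⟩; exact ⟨by exact_mod_cast h1, h2⟩
    rw [if_congr hiff rfl (stab_eq_firstCov pos r K)]

theorem firstCov_none_out (pos : Int → List Int) (r h : Int)
    (hr : ¬(0 ≤ r ∧ r < h)) : ∀ (K : List Int),
    (∀ k ∈ K, ∀ x ∈ pos k, 0 ≤ x ∧ x < h) →
    pvFirstCov (K.map (fun k => (k, pos k))) r = none
  | [], _ => rfl
  | k :: K, hb => by
    simp only [List.map_cons, pvFirstCov]
    rw [if_neg, firstCov_none_out pos r h hr K (fun k' hk' => hb k' (by simp [hk']))]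
    rintro ⟨h1, h2, h3⟩
    have hne : pos k ≠ [] := by intro hnil; rw [hnil] at h1; simp at h1
    have hh := hb k (by simp) _ (pv_headD_mem _ hne)
    have hl := hb k (by simp) _ (pv_getLastD_mem _ hne)
    exact hr ⟨le_trans hh.1 h2, lt_of_le_of_lt h3 hl.2⟩

theorem pv_rowlen_transfer (w : Nat) (M N : List (List Int))
    (hm : M.map List.length = N.map List.length)
    (h : ∀ row ∈ N, w < row.length) : ∀ row ∈ M, w < row.length := by
  intro row hrow
  have hmem : row.length ∈ N.map List.length := by
    rw [← hm]; exact List.mem_map_of_mem hrow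
  obtain ⟨row', hrow', he⟩ := List.mem_map.1 hmem
  have := h row' hrow'
  omega

theorem pv_getD_mem (M : List (List Int)) (i : Nat) (hi : i < M.length) : M.getD i [] ∈ M := by
  rw [List.getD_eq_getElem?_getD, List.getElem?_eq_getElem hi]
  exact List.getElem_mem _

theorem fill_mapLen (c k : Int) : ∀ (l : List Int) (M : List (List Int)),
    ((l.foldl (fun m r => if pvCell m r c = 0 then pvSetCell m r c k else m) M).map List.length)
      = M.map List.length
  | [], _ => rfl
  | r :: l, M => by
    simp only [List.foldl_cons]
    rw [fill_mapLen c k l]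
    by_cases h0 : pvCell M r c = 0
    · rw [if_pos h0, mapLen_setCell]
    · rw [if_neg h0]

theorem fill_cells (c k b : Int) (hc : 0 ≤ c) :
    ∀ (n : Nat) (a : Int) (M : List (List Int)), (b + 1 - a).toNat ≤ n → 0 ≤ a →
      b < (M.length : Int) → (∀ row ∈ M, c.toNat < row.length) →
      ∀ i j : Nat,
        gcell ((PySem.List.pyRange a (b + 1) 1).foldl
          (fun m r => if pvCell m r c = 0 then pvSetCell m r c k else m) M) i j
        = if ((j : Int) = c ∧ a ≤ (i : Int) ∧ (i : Int) ≤ b ∧ gcell M i c.toNat = 0) then k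
          else gcell M i j := by
  intro n
  induction n with
  | zero =>
    intro a M hn ha hb hrow i j
    rw [PySem.List.pyRange_one_eq_nil (by omega)]
    simp only [List.foldl_nil]
    rw [if_neg]
    rintro ⟨_, h2, h3, _⟩
    omega
  | succ n ih =>
    intro a M hn ha hb hrow i j
    by_cases hab : b + 1 ≤ a
    · rw [PySem.List.pyRange_one_eq_nil hab]
      simp only [List.foldl_nil]
      rw [if_neg]
      rintro ⟨_, h2, h3, _⟩
      omega
    · rw [PySem.List.pyRange_one_cons (by omega : a < b + 1)]
      simp only [List.foldl_cons]
      have hat : a.toNat < M.length := by omega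
      have hclt : c.toNat < (M.getD a.toNat []).length :=
        hrow _ (pv_getD_mem M a.toNat hat)
      have hstep : ∀ (i j : Nat),
          gcell (if pvCell M a c = 0 then pvSetCell M a c k else M) i j
          = if ((i : Int) = a ∧ (j : Int) = c ∧ gcell M i c.toNat = 0) then k
            else gcell M i j := by
        intro i j
        by_cases hia : i = a.toNat
        · subst hia
          by_cases h0 : pvCell M a c = 0
          · rw [if_pos h0, gcell_setCell M a c k ha hc hat hclt]
            have h0' : gcell M a.toNat c.toNat = 0 := by
              rw [← pvCell_nonneg M a c ha hc]; exact h0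
            by_cases hj : j = c.toNat
            · rw [if_pos ⟨rfl, hj⟩, if_pos (by constructor; omega; constructor; omega; exact h0')]
            · rw [if_neg (by tauto), if_neg (by rintro ⟨_, h2, _⟩; omega)]
          · rw [if_neg h0]
            have h0' : ¬ gcell M a.toNat c.toNat = 0 := by
              rw [← pvCell_nonneg M a c ha hc]; exact h0
            rw [if_neg (by rintro ⟨_, _, h3⟩; exact h0' h3)]
        · have hstep0 : gcell (if pvCell M a c = 0 then pvSetCell M a c k else M) i j
              = gcell M i j := by
            by_cases h0 : pvCell M a c = 0
            · rw [if_pos h0, gcell_setCell M a c k ha hc hat hclt, if_neg (by tauto)]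
            · rw [if_neg h0]
          rw [hstep0, if_neg (by rintro ⟨h1, _, _⟩; omega)]
      have hlen1 : (if pvCell M a c = 0 then pvSetCell M a c k else M).map List.length
          = M.map List.length := by
        by_cases h0 : pvCell M a c = 0
        · rw [if_pos h0, mapLen_setCell]
        · rw [if_neg h0]
      have hL1 : (if pvCell M a c = 0 then pvSetCell M a c k else M).length = M.length := by
        have := congrArg List.length hlen1; simpa using this
      rw [ih (a + 1) _ (by omega) (by omega) (by rw [hL1]; exact hb) (by
        exact pv_rowlen_transfer c.toNat _ M hlen1 hrow) i j]
      simp only [hstep]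
      split_ifs <;> first | rfl | omega

theorem paint_mapLen (c : Int) : ∀ (items : List (Int × List Int)) (M : List (List Int)),
    ((items.foldl (pvPaintColumn c) M).map List.length) = M.map List.length
  | [], _ => rfl
  | kv :: items, M => by
    simp only [List.foldl_cons]
    rw [paint_mapLen c items]
    unfold pvPaintColumn
    by_cases h2 : 2 ≤ kv.2.length
    · rw [if_pos h2, fill_mapLen]
    · rw [if_neg h2]

theorem paint_cells (c : Int) (hc : 0 ≤ c) :
    ∀ (items : List (Int × List Int)) (M : List (List Int)),
      (∀ kv ∈ items, kv.1 ≠ 0 ∧ kv.2 ≠ [] ∧ kv.2.Pairwise (· < ·) ∧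
        ∀ x ∈ kv.2, 0 ≤ x ∧ x < (M.length : Int)) →
      (∀ row ∈ M, c.toNat < row.length) →
      ∀ i j : Nat, gcell (items.foldl (pvPaintColumn c) M) i j
        = if ((j : Int) = c ∧ gcell M i c.toNat = 0) then (pvFirstCov items (i : Int)).getD 0
          else gcell M i j
  | [], M, _, _, i, j => by
    simp only [List.foldl_nil, pvFirstCov, Option.getD_none]
    by_cases hcond : (j : Int) = c ∧ gcell M i c.toNat = 0
    · rw [if_pos hcond]
      have hj : j = c.toNat := by omega
      rw [hj]
      exact hcond.2
    · rw [if_neg hcond]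
  | (k, ps) :: items, M, hitems, hrow, i, j => by
    simp only [List.foldl_cons]
    obtain ⟨hk0, hne, hsort, hbounds⟩ := hitems (k, ps) (by simp)
    by_cases h2 : 2 ≤ ps.length
    · have hM₁ : ∀ (i j : Nat), gcell (pvPaintColumn c M (k, ps)) i j
          = if ((j : Int) = c ∧ ps.headD 0 ≤ (i : Int) ∧ (i : Int) ≤ ps.getLastD 0 ∧
                gcell M i c.toNat = 0) then k else gcell M i j := by
        intro i j
        unfold pvPaintColumn
        rw [if_pos h2]
        simp only
        rw [pv_min_getD ps hne hsort, pv_max_getD ps hne hsort]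
        exact fill_cells c k (ps.getLastD 0) hc (((ps.getLastD 0) + 1 - ps.headD 0).toNat)
          (ps.headD 0) M (le_refl _) (hbounds _ (pv_headD_mem ps hne)).1
          (hbounds _ (pv_getLastD_mem ps hne)).2 hrow i j
      have hlen1 : (pvPaintColumn c M (k, ps)).map List.length = M.map List.length := by
        unfold pvPaintColumn
        rw [if_pos h2]
        simp only
        exact fill_mapLen c k _ M
      have hL1 : (pvPaintColumn c M (k, ps)).length = M.length := by
        have := congrArg List.length hlen1; simpa using this
      rw [paint_cells c hc items (pvPaintColumn c M (k, ps))
        (fun kv hkv => by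
          obtain ⟨a1, a2, a3, a4⟩ := hitems kv (List.mem_cons_of_mem _ hkv)
          refine ⟨a1, a2, a3, fun x hx => ?_⟩
          have := a4 x hx
          rw [hL1]
          exact this)
        (pv_rowlen_transfer c.toNat _ M hlen1 hrow) i j]
      simp only [hM₁, pvFirstCov]
      split_ifs <;> first | rfl | omega
    · have hM₁ : pvPaintColumn c M (k, ps) = M := by
        unfold pvPaintColumn
        rw [if_neg h2]
      rw [hM₁]
      rw [paint_cells c hc items M
        (fun kv hkv => hitems kv (List.mem_cons_of_mem _ hkv)) hrow i j]
      simp only [pvFirstCov]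
      split_ifs <;> first | rfl | omega

theorem stab_mapLen (c : Int) (items : List (Int × (Int × Int × Int))) :
    ∀ (l : List Int) (M : List (List Int)),
    ((l.foldl (fun result r =>
        if pvCell result r c = 0 then
          match pvStabFirst items r with
          | some color => pvSetCell result r c color
          | none => result
        else result) M).map List.length) = M.map List.length
  | [], _ => rfl
  | r :: l, M => by
    simp only [List.foldl_cons]
    rw [stab_mapLen c items l]
    by_cases h0 : pvCell M r c = 0
    · rw [if_pos h0]
      cases pvStabFirst items r with
      | none => rfl
      | some color => exact mapLen_setCell M r c color
    · rw [if_neg h0]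

theorem stabpass_cells (c : Int) (hc : 0 ≤ c) (items : List (Int × (Int × Int × Int)))
    (hI : Int) :
    ∀ (n : Nat) (a : Int) (M : List (List Int)), (hI - a).toNat ≤ n → 0 ≤ a →
      hI ≤ (M.length : Int) → (∀ row ∈ M, c.toNat < row.length) →
      ∀ i j : Nat,
        gcell ((PySem.List.pyRange a hI 1).foldl (fun result r =>
          if pvCell result r c = 0 then
            match pvStabFirst items r with
            | some color => pvSetCell result r c color
            | none => result
          else result) M) i j
        = if ((j : Int) = c ∧ a ≤ (i : Int) ∧ (i : Int) < hI ∧ gcell M i c.toNat = 0)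
          then (pvStabFirst items (i : Int)).getD 0 else gcell M i j := by
  intro n
  induction n with
  | zero =>
    intro a M hn ha hb hrow i j
    rw [PySem.List.pyRange_one_eq_nil (by omega)]
    simp only [List.foldl_nil]
    rw [if_neg]
    rintro ⟨_, h2, h3, _⟩
    omega
  | succ n ih =>
    intro a M hn ha hb hrow i j
    by_cases hab : hI ≤ a
    · rw [PySem.List.pyRange_one_eq_nil hab]
      simp only [List.foldl_nil]
      rw [if_neg]
      rintro ⟨_, h2, h3, _⟩
      omega
    · rw [PySem.List.pyRange_one_cons (by omega : a < hI)]
      simp only [List.foldl_cons]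
      have hat : a.toNat < M.length := by omega
      have hclt : c.toNat < (M.getD a.toNat []).length :=
        hrow _ (pv_getD_mem M a.toNat hat)
      have hstep : ∀ (i j : Nat),
          gcell (if pvCell M a c = 0 then
            match pvStabFirst items a with
            | some color => pvSetCell M a c color
            | none => M
          else M) i j
          = if ((i : Int) = a ∧ (j : Int) = c ∧ gcell M i c.toNat = 0)
            then (pvStabFirst items (i : Int)).getD 0 else gcell M i j := by
        intro i j
        by_cases hia : i = a.toNat
        · subst hia
          have hcast : ((a.toNat : Nat) : Int) = a := Int.toNat_of_nonneg ha
          rw [show pvStabFirst items ((a.toNat : Nat) : Int) = pvStabFirst items a from by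
            rw [hcast]]
          by_cases h0 : pvCell M a c = 0
          · have h0' : gcell M a.toNat c.toNat = 0 := by
              rw [← pvCell_nonneg M a c ha hc]; exact h0
            rw [if_pos h0]
            cases hs : pvStabFirst items a with
            | none =>
              by_cases hj : j = c.toNat
              · rw [if_pos ⟨hcast, by omega, h0'⟩, hj]
                exact h0'
              · rw [if_neg (by rintro ⟨_, hbb, _⟩; omega)]
            | some color =>
              rw [gcell_setCell M a c color ha hc hat hclt]
              by_cases hj : j = c.toNat
              · rw [if_pos ⟨rfl, hj⟩, if_pos ⟨hcast, by omega, h0'⟩]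
                rfl
              · rw [if_neg (by tauto), if_neg (by rintro ⟨_, hbb, _⟩; omega)]
          · rw [if_neg h0]
            have h0' : ¬ gcell M a.toNat c.toNat = 0 := by
              rw [← pvCell_nonneg M a c ha hc]; exact h0
            rw [if_neg (by rintro ⟨_, _, h3⟩; exact h0' h3)]
        · have hstep0 : gcell (if pvCell M a c = 0 then
              match pvStabFirst items a with
              | some color => pvSetCell M a c color
              | none => M
            else M) i j = gcell M i j := by
            by_cases h0 : pvCell M a c = 0
            · rw [if_pos h0]
              cases pvStabFirst items a with
              | none => rfl
              | some color =>
                rw [gcell_setCell M a c color ha hc hat hclt, if_neg (by tauto)]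
            · rw [if_neg h0]
          rw [hstep0, if_neg (by rintro ⟨h1, _, _⟩; omega)]
      have hlen1 : (if pvCell M a c = 0 then
            match pvStabFirst items a with
            | some color => pvSetCell M a c color
            | none => M
          else M).map List.length = M.map List.length := by
        by_cases h0 : pvCell M a c = 0
        · rw [if_pos h0]
          cases pvStabFirst items a with
          | none => rfl
          | some color => exact mapLen_setCell M a c color
        · rw [if_neg h0]
      have hL1 : (if pvCell M a c = 0 then
            match pvStabFirst items a with
            | some color => pvSetCell M a c color
            | none => M
          else M).length = M.length := by
        have := congrArg List.length hlen1; simpa using this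
      rw [ih (a + 1) _ (by omega) (by omega) (by rw [hL1]; exact hb)
        (pv_rowlen_transfer c.toNat _ M hlen1 hrow) i j]
      simp only [hstep]
      split_ifs <;> first | rfl | omega

theorem colPass_eq (grid : List (List Int))
    (hpre : ∀ row ∈ grid, (grid.headD []).length ≤ row.length)
    (c : Int) (hc0 : 0 ≤ c) (hcw : c < ((grid.headD []).length : Int))
    (M : List (List Int)) (hmap : M.map List.length = grid.map List.length) :
    pvColPassA grid (grid.length : Int) M c = pvColPassB grid (grid.length : Int) M c := by
  have hrowg : ∀ row ∈ grid, c.toNat < row.length := by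
    intro row hr
    have := hpre row hr
    omega
  have hrowM : ∀ row ∈ M, c.toNat < row.length :=
    pv_rowlen_transfer c.toNat M grid hmap hrowg
  have hlenM : M.length = grid.length := by
    have := congrArg List.length hmap; simpa using this
  have hKmem : ∀ k ∈ (pvPositionsDict grid (grid.length : Int) c).keys,
      k ∈ (pvPairs grid (grid.length : Int) c).map (fun p => p.1) := by
    intro k hk
    rw [keysA_eq] at hk
    exact (PySem.Set.mem_ofList _ _).1 hk
  have hitems : ∀ kv ∈ (pvPositionsDict grid (grid.length : Int) c).keys.map
      (fun k => (k, pvPos grid (grid.length : Int) c k)),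
      kv.1 ≠ 0 ∧ kv.2 ≠ [] ∧ kv.2.Pairwise (· < ·) ∧
        ∀ x ∈ kv.2, 0 ≤ x ∧ x < (M.length : Int) := by
    intro kv hkv
    obtain ⟨k, hk, rfl⟩ := List.mem_map.1 hkv
    refine ⟨key_ne_zero _ _ _ _ (hKmem k hk), pos_ne_nil _ _ _ _ (hKmem k hk),
      pos_pairwise _ _ _ _, fun x hx => ?_⟩
    have := mem_pos_bounds grid (grid.length : Int) c k x hx
    rw [hlenM]
    exact this
  have hboundsK : ∀ k ∈ PySem.Set.ofList ((pvPairs grid (grid.length : Int) c).map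
      (fun p => p.1)), ∀ x ∈ pvPos grid (grid.length : Int) c k,
      0 ≤ x ∧ x < (grid.length : Int) := by
    intro k _ x hx
    exact mem_pos_bounds grid (grid.length : Int) c k x hx
  apply pv_mat_ext
  · show ((pvPositionsDict grid (grid.length : Int) c).items.foldl
        (pvPaintColumn c) M).map List.length = _
    rw [paint_mapLen]
    show _ = ((PySem.List.pyRange 0 (grid.length : Int) 1).foldl (fun result r =>
        if pvCell result r c = 0 then
          match pvStabFirst (pvSpansDict grid (grid.length : Int) c).items r with
          | some color => pvSetCell result r c color
          | none => result
        else result) M).map List.length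
    rw [stab_mapLen]
  · intro i j
    show gcell ((pvPositionsDict grid (grid.length : Int) c).items.foldl
        (pvPaintColumn c) M) i j
      = gcell ((PySem.List.pyRange 0 (grid.length : Int) 1).foldl (fun result r =>
          if pvCell result r c = 0 then
            match pvStabFirst (pvSpansDict grid (grid.length : Int) c).items r with
            | some color => pvSetCell result r c color
            | none => result
          else result) M) i j
    rw [itemsA_eq]
    rw [paint_cells c hc0 _ M hitems hrowM i j]
    rw [stabpass_cells c hc0 (pvSpansDict grid (grid.length : Int) c).items
      (grid.length : Int) (grid.length : Int).toNat 0 M (by omega) le_rfl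
      (by omega) hrowM i j]
    rw [show (pvSpansDict grid (grid.length : Int) c).items
        = ((pvPositionsDict grid (grid.length : Int) c).keys.map (fun k =>
            (k, ((pvPos grid (grid.length : Int) c k).headD 0,
                 (pvPos grid (grid.length : Int) c k).getLastD 0,
                 ((pvPos grid (grid.length : Int) c k).length : Int))))) from by
      rw [itemsB_eq, keysB_eq, keysA_eq]]
    rw [stab_eq_firstCov (pvPos grid (grid.length : Int) c) (i : Int)]
    by_cases hcnd : ((j : Int) = c ∧ gcell M i c.toNat = 0)
    · by_cases hin : (i : Int) < (grid.length : Int)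
      · rw [if_pos hcnd, if_pos ⟨hcnd.1, by omega, hin, hcnd.2⟩]
      · rw [if_pos hcnd, if_neg (by rintro ⟨_, _, h3, _⟩; omega)]
        have hnone : pvFirstCov ((pvPositionsDict grid (grid.length : Int) c).keys.map
            (fun k => (k, pvPos grid (grid.length : Int) c k))) (i : Int) = none := by
          apply firstCov_none_out _ _ (grid.length : Int) (by omega)
          intro k hk
          exact hboundsK k (by rw [← keysA_eq]; exact hk)
        rw [hnone]
        have hj : j = c.toNat := by omega
        rw [hj]
        exact hcnd.2.symm
    · rw [if_neg hcnd, if_neg (by rintro ⟨h1, _, _, h4⟩; exact hcnd ⟨h1, h4⟩)]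

theorem pv_passes (grid : List (List Int))
    (hpre : ∀ row ∈ grid, (grid.headD []).length ≤ row.length) :
    connect_same_color_v grid = connect_same_color_v_alt grid := by
  unfold connect_same_color_v connect_same_color_v_alt
  by_cases hg : grid = [] ∨ grid.headD [] = []
  · rw [if_pos hg, if_pos hg]
  · rw [if_neg hg, if_neg hg]
    show (PySem.List.pyRange 0 ((grid.headD []).length : Int) 1).foldl
        (pvColPassA grid (grid.length : Int)) (grid.map fun row => row)
      = (PySem.List.pyRange 0 ((grid.headD []).length : Int) 1).foldl
        (pvColPassB grid (grid.length : Int)) (grid.map fun row => row)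
    rw [List.map_id']
    apply pv_foldl_congr_inv (fun M => M.map List.length = grid.map List.length)
    · rfl
    · intro s a ha hP
      rw [PySem.List.mem_pyRange_one] at ha
      refine ⟨colPass_eq grid hpre a ha.1 ha.2 s hP, ?_⟩
      show (pvColPassA grid (grid.length : Int) s a).map List.length = _
      unfold pvColPassA
      rw [paint_mapLen]
      exact hP

-- ===== VERDICT (by name: the statement is the Claim_ definition above) =====
theorem connect_same_color_v_spec : Claim_equal_connect_same_color_v := by
  intro grid _hdom hpre
  unfold Spec_connect_same_color_v
  exact pv_passes grid hpre
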